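-- pv_equiv track=rewrite | github.com/JmProgram17/Schedium-BE | app/core/middleware/security.py | _check_suspicious_url
-- ===== SOURCE A (Python) =====
-- def _check_suspicious_url(url: str) -> bool:
--     """Check URL for suspicious patterns."""
--     suspicious_patterns = [
--         r"\.\./",  # Directory traversal
--         r"<script",  # XSS attempt
--         r"javascript:",  # XSS attempt
--         r"\x00",  # Null byte
--         r"%00",  # Encoded null byte
--         r"\.\.\\",  # Windows directory traversal
--     ]
--
--     url_lower = url.lower()
--     for pattern in suspicious_patterns:
--         if pattern in url_lower:
--             return True
--
--     return False
-- ===== SOURCE B (Python) =====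
-- def _check_suspicious_url(url: str) -> bool:
--     """Single left-to-right positional scan: at each index, test whether any
--     forbidden literal starts there, instead of six separate full `in` scans."""
--     suspicious_patterns = (
--         "\\.\\./",
--         "<script",
--         "javascript:",
--         "\\x00",
--         "%00",
--         "\\.\\.\\\\",
--     )
--     s = url.lower()
--     for i in range(len(s)):
--         for p in suspicious_patterns:
--             if s.startswith(p, i):
--                 return True
--     return False
-- ===== Notes on version B (the rewrite author's own statement) =====
-- stated objective: alternative
-- what changed: Replaces six independent full substring-membership scans of the lowercased URL by one left-to-right positional scan that tests all six literal patterns at each index.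
import Mathlib
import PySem

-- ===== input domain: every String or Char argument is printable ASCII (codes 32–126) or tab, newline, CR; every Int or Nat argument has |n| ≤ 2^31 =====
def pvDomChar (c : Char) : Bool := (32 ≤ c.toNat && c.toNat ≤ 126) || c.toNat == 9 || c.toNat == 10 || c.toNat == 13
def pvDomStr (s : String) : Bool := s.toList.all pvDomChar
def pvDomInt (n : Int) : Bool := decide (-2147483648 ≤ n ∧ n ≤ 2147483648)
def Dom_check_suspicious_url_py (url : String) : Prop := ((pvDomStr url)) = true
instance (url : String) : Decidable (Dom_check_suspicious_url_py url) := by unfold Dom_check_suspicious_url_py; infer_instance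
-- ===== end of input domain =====

-- B replaces A's six independent full substring scans by one left-to-right
-- positional scan testing every pattern at each index (alternative structure, same cost).


-- ===== PORT A =====
-- the six literal patterns (raw-string literals of A, as exact character sequences)
def pvPatsA : List String := ["\\.\\./", "<script", "javascript:", "\\x00", "%00", "\\.\\.\\\\"]

-- for-loop with early `return True` over the pattern list = List.any
def check_suspicious_url_py (url : String) : Bool :=
  let url_lower := PySem.Str.lower url
  pvPatsA.any (fun pattern => PySem.Str.isIn pattern url_lower)

-- ===== PORT B =====
def pvPatsB : List (List Char) :=
  ["\\.\\./".toList, "<script".toList, "javascript:".toList,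
   "\\x00".toList, "%00".toList, "\\.\\.\\\\".toList]

-- `for i in range(len(s)): for p in pats: if s.startswith(p, i)`: the outer index
-- loop is recursion over the suffixes of s; s.startswith(p, i) with 0 ≤ i is exactly
-- p.isPrefixOf (suffix at i)
def pvScanB (pats : List (List Char)) : List Char → Bool
  | [] => false
  | c :: rest => pats.any (fun p => p.isPrefixOf (c :: rest)) || pvScanB pats rest

def check_suspicious_url_py_alt (url : String) : Bool :=
  pvScanB pvPatsB (PySem.Str.lower url).toList

-- ===== PRECONDITION & SPEC =====
def Spec_check_suspicious_url_py (url : String) (out : Bool) : Prop := out = check_suspicious_url_py_alt url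
instance (url : String) (out : Bool) : Decidable (Spec_check_suspicious_url_py url out) := by unfold Spec_check_suspicious_url_py; infer_instance

-- ===== CLAIM (what is proved, stated in full; the proofs are below) =====
def Claim_equal_check_suspicious_url_py : Prop := ∀ (url : String), Dom_check_suspicious_url_py url → Spec_check_suspicious_url_py url (check_suspicious_url_py url)

-- ===== LEMMAS AND PROOFS =====

-- B's positional scan finds exactly the patterns that occur as an infix
-- (the empty suffix skipped by the scan cannot carry a nonempty pattern)
theorem pvScanB_iff (pats : List (List Char)) (h : ∀ p ∈ pats, p ≠ []) (l : List Char) :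
    pvScanB pats l = true ↔ ∃ p ∈ pats, p <:+: l := by
  induction l with
  | nil =>
      simp only [pvScanB, Bool.false_eq_true, false_iff]
      rintro ⟨p, hp, hinf⟩
      exact h p hp (List.eq_nil_of_infix_nil hinf)
  | cons c rest ih =>
      simp only [pvScanB, Bool.or_eq_true, List.any_eq_true, ih,
        List.isPrefixOf_iff_prefix, List.infix_cons_iff]
      constructor
      · rintro (⟨p, hp, hpre⟩ | ⟨p, hp, hinf⟩)
        · exact ⟨p, hp, Or.inl hpre⟩
        · exact ⟨p, hp, Or.inr hinf⟩
      · rintro ⟨p, hp, hpre | hinf⟩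
        · exact Or.inl ⟨p, hp, hpre⟩
        · exact Or.inr ⟨p, hp, hinf⟩

-- ===== VERDICT (by name: the statement is the Claim_ definition above) =====
theorem check_suspicious_url_py_spec : Claim_equal_check_suspicious_url_py := by
  intro url _
  unfold Spec_check_suspicious_url_py check_suspicious_url_py check_suspicious_url_py_alt
  rw [Bool.eq_iff_iff]
  rw [pvScanB_iff pvPatsB (by decide)]
  simp only [List.any_eq_true, PySem.Str.isIn_iff_infix, pvPatsA, pvPatsB,
    List.mem_cons, List.not_mem_nil, or_false]
  constructor
  · rintro ⟨p, hp, hinf⟩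
    rcases hp with rfl | rfl | rfl | rfl | rfl | rfl <;>
      exact ⟨_, by simp, hinf⟩
  · rintro ⟨p, hp, hinf⟩
    rcases hp with rfl | rfl | rfl | rfl | rfl | rfl <;>
      exact ⟨_, by simp, hinf⟩
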